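-- pv_equiv track=rewrite | github.com/kids-first/kf-etl-clin-portal | deployment/lambda_functions/add_portal_etl_emr_step/portal_etl_emr_step_service.py | get_next_step_prefix
-- ===== SOURCE A (Python) =====
-- def get_next_step_prefix(portal_etl_steps_to_execute: list, current_etl_steps: list, ) -> str:
--     if not current_etl_steps:
--         etl_step_name = portal_etl_steps_to_execute[0]
--     else:
--         try:
--             index = next(
--                 (i for i, prefix in enumerate(portal_etl_steps_to_execute) if
--                  current_etl_steps[-1].startswith(prefix)),
--                 None)
--
--             if index is not None and index < len(portal_etl_steps_to_execute) - 1: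
--                 etl_step_name = portal_etl_steps_to_execute[index + 1]
--             else:
--                 return ""  # No next step
--         except ValueError:
--             return ""  # Current step not found in the list
--
--     return etl_step_name
-- ===== SOURCE B (Python) =====
-- def get_next_step_prefix(portal_etl_steps_to_execute: list, current_etl_steps: list, ) -> str:
--     if not current_etl_steps:
--         return portal_etl_steps_to_execute[0]
--     last = current_etl_steps[-1]
--     pos = {}
--     for i, step in enumerate(portal_etl_steps_to_execute):
--         if step not in pos:
--             pos[step] = i
--     best = None
--     for length in range(len(last) + 1):
--         i = pos.get(last[:length])
--         if i is not None and (best is None or i < best):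
--             best = i
--     if best is not None and best + 1 < len(portal_etl_steps_to_execute):
--         return portal_etl_steps_to_execute[best + 1]
--     return ""
-- ===== Notes on version B (the rewrite author's own statement) =====
-- stated objective: alternative
-- what changed: B builds a dict from each step string to its first position once, then queries it with every prefix of the current step's last entry and keeps the minimum position, replacing A's linear startswith scan; the inner startswith comparison disappears.
import Mathlib
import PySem

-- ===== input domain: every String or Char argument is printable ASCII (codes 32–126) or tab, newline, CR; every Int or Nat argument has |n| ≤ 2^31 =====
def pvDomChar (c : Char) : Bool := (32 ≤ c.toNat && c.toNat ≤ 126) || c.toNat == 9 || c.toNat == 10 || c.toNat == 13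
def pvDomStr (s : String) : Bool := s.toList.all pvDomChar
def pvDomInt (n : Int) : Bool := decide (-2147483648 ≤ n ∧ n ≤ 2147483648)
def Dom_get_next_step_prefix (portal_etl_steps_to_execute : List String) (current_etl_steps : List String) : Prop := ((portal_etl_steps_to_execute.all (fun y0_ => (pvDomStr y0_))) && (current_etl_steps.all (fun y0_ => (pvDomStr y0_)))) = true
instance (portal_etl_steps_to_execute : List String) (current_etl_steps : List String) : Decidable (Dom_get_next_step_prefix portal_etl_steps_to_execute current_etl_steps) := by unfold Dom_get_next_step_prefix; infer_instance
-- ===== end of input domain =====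

-- B replaces A's linear startswith scan by a hash index: a dict mapping each step string to its
-- first position, queried once per prefix of the current step's last entry (objective: alternative).

-- ===== PORT A =====
-- first index i (from offset k) with current[-1].startswith(prefix): the enumerate/next generator
def pvFindIdxA (last : String) : List String → Nat → Option Nat
  | [], _ => none
  | p :: rest, k => if PySem.Str.startswith last p then some k else pvFindIdxA last rest (k + 1)

def get_next_step_prefix (portal_etl_steps_to_execute : List String) (current_etl_steps : List String) : String :=
  if current_etl_steps.isEmpty then
    -- portal_etl_steps_to_execute[0]; IndexError (excluded by Pre_) rendered as ""
    (PySem.List.pyGet? portal_etl_steps_to_execute 0).getD ""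
  else
    match pvFindIdxA (current_etl_steps.getLastD "") portal_etl_steps_to_execute 0 with
    | some i =>
        if i < portal_etl_steps_to_execute.length - 1 then
          (PySem.List.pyGet? portal_etl_steps_to_execute (Int.ofNat (i + 1))).getD ""
        else ""
    | none => ""

-- ===== PORT B =====
-- i = pos.get(last[:length]); if i is not None and (best is None or i < best): best = i
def pvUpdateBest (best : Option Int) (i : Option Int) : Option Int :=
  match i with
  | none => best
  | some iv =>
    match best with
    | none => some iv
    | some bv => if iv < bv then some iv else best

def get_next_step_prefix_alt (portal_etl_steps_to_execute : List String) (current_etl_steps : List String) : String :=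
  if current_etl_steps.isEmpty then
    (PySem.List.pyGet? portal_etl_steps_to_execute 0).getD ""
  else
    let last := current_etl_steps.getLastD ""
    -- for i, step in enumerate(ps): if step not in pos: pos[step] = i
    let pos : PySem.Dict String Int :=
      (PySem.List.enumerate portal_etl_steps_to_execute 0).foldl
        (fun d pr => if d.contains pr.2 then d else d.insert pr.2 pr.1) PySem.Dict.empty
    -- for length in range(len(last) + 1): …
    let best : Option Int :=
      (PySem.List.pyRange 0 (PySem.Str.len last + 1) 1).foldl
        (fun best l => pvUpdateBest best (pos.get? (PySem.Str.slice last none (some l)))) none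
    match best with
    | some b =>
        if b + 1 < (portal_etl_steps_to_execute.length : Int) then
          (PySem.List.pyGet? portal_etl_steps_to_execute (b + 1)).getD ""
        else ""
    | none => ""

-- ===== PRECONDITION & SPEC =====
-- Pre_ excludes only the inputs where both lists are empty: there both A and B raise IndexError on [0].
def Pre_get_next_step_prefix (portal_etl_steps_to_execute : List String) (current_etl_steps : List String) : Prop :=
  portal_etl_steps_to_execute ≠ [] ∨ current_etl_steps ≠ []
instance (portal_etl_steps_to_execute : List String) (current_etl_steps : List String) : Decidable (Pre_get_next_step_prefix portal_etl_steps_to_execute current_etl_steps) := by unfold Pre_get_next_step_prefix; infer_instance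

def pvWitness_get_next_step_prefix : List String × List String := (["a", "b"], ["abc"])

def Spec_get_next_step_prefix (portal_etl_steps_to_execute : List String) (current_etl_steps : List String) (out : String) : Prop := out = get_next_step_prefix_alt portal_etl_steps_to_execute current_etl_steps
instance (portal_etl_steps_to_execute : List String) (current_etl_steps : List String) (out : String) : Decidable (Spec_get_next_step_prefix portal_etl_steps_to_execute current_etl_steps out) := by unfold Spec_get_next_step_prefix; infer_instance

-- ===== CLAIM (what is proved, stated in full; the proofs are below) =====
def Claim_equal_get_next_step_prefix : Prop := ∀ (portal_etl_steps_to_execute : List String) (current_etl_steps : List String), Dom_get_next_step_prefix portal_etl_steps_to_execute current_etl_steps → Pre_get_next_step_prefix portal_etl_steps_to_execute current_etl_steps → Spec_get_next_step_prefix portal_etl_steps_to_execute current_etl_steps (get_next_step_prefix portal_etl_steps_to_execute current_etl_steps)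

-- ===== LEMMAS AND PROOFS =====

-- first index (from offset k) whose element EQUALS c: what the first-position dict stores at key c
def pvFirstIdx (c : String) : List String → Int → Option Int
  | [], _ => none
  | p :: rest, k => if p = c then some k else pvFirstIdx c rest (k + 1)

theorem pvFirstIdx_cons (c p : String) (rest : List String) (k : Int) :
    pvFirstIdx c (p :: rest) k = if p = c then some k else pvFirstIdx c rest (k + 1) := by
  rw [pvFirstIdx]

theorem pvFirstIdx_ge (c : String) (ps : List String) (k v : Int)
    (h : pvFirstIdx c ps k = some v) : k ≤ v := by
  induction ps generalizing k with
  | nil => simp [pvFirstIdx] at h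
  | cons p rest ih =>
    rw [pvFirstIdx] at h
    split at h
    · injection h with h; omega
    · have := ih (k + 1) h; omega

-- the dict built by the first loop answers get? with the first index of the key
theorem pvBuildPos_get (ps : List String) (k : Int) (d : PySem.Dict String Int) (c : String) :
    ((PySem.List.enumerate ps k).foldl
        (fun d pr => if d.contains pr.2 then d else d.insert pr.2 pr.1) d).get? c
      = (d.get? c).or (pvFirstIdx c ps k) := by
  induction ps generalizing k d with
  | nil => simp [PySem.List.enumerate_nil, pvFirstIdx]
  | cons p rest ih =>
    rw [PySem.List.enumerate_cons, List.foldl_cons, ih]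
    by_cases hc : d.contains p = true
    · rw [if_pos hc]
      by_cases hpc : p = c
      · subst hpc
        have : (d.get? p).isSome := by rw [← PySem.Dict.contains_eq_isSome_get?]; exact hc
        obtain ⟨v, hv⟩ := Option.isSome_iff_exists.mp this
        simp [pvFirstIdx, hv]
      · rw [pvFirstIdx, if_neg hpc]
    · rw [if_neg hc]
      by_cases hpc : p = c
      · subst hpc
        have hnone : d.get? p = none := by
          cases hg : d.get? p with
          | none => rfl
          | some v => exact absurd (by rw [PySem.Dict.contains_eq_isSome_get?, hg]; rfl) hc
        rw [PySem.Dict.get?_insert_self, hnone, pvFirstIdx, if_pos rfl]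
        rfl
      · rw [PySem.Dict.get?_insert_of_ne d k (fun h => hpc h.symm), pvFirstIdx, if_neg hpc]

-- shift lemma for A's scan
theorem pvFindIdxA_shift (last : String) (xs : List String) (k : Nat) :
    pvFindIdxA last xs k = (pvFindIdxA last xs 0).map (· + k) := by
  induction xs generalizing k with
  | nil => simp [pvFindIdxA]
  | cons p rest ih =>
    by_cases h : PySem.Str.startswith last p = true
    · rw [pvFindIdxA, if_pos h, pvFindIdxA, if_pos h]; simp
    · rw [pvFindIdxA, if_neg h, pvFindIdxA, if_neg h, ih (k + 1), ih 1]
      cases pvFindIdxA last rest 0 with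
      | none => rfl
      | some v => simp only [Option.map_some, Option.some.injEq]; omega

-- okv k o: o is none, the target k, or a strictly larger value
def pvOkv (k : Int) (o : Option Int) : Prop := o = none ∨ o = some k ∨ ∃ v, o = some v ∧ k < v

theorem pvUpdateBest_cases (b i : Option Int) : pvUpdateBest b i = b ∨ pvUpdateBest b i = i := by
  unfold pvUpdateBest
  cases i with
  | none => exact Or.inl rfl
  | some iv =>
    cases b with
    | none => exact Or.inr rfl
    | some bv =>
      simp only []
      by_cases hlt : iv < bv
      · rw [if_pos hlt]; exact Or.inr rfl
      · rw [if_neg hlt]; exact Or.inl rfl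

theorem pvUpdateBest_okv {k : Int} {b i : Option Int} (hb : pvOkv k b) (hi : pvOkv k i) :
    pvOkv k (pvUpdateBest b i) := by
  rcases pvUpdateBest_cases b i with h | h <;> rw [h] <;> assumption

theorem pvUpdateBest_attained {k : Int} {b : Option Int} (hb : pvOkv k b) :
    pvUpdateBest b (some k) = some k := by
  rcases hb with hb | hb | ⟨v, hb, hv⟩ <;> subst hb <;> simp [pvUpdateBest] <;> omega

theorem pvUpdateBest_keep {k : Int} {i : Option Int} (hi : pvOkv k i) :
    pvUpdateBest (some k) i = some k := by
  rcases hi with hi | hi | ⟨v, hi, hv⟩ <;> subst hi <;> simp [pvUpdateBest] <;> omega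

-- folding pvUpdateBest over okv values reaches k once it is attained
theorem pvFold_attain {k : Int} (g : Int → Option Int) (lens : List Int) (b : Option Int)
    (hb : pvOkv k b) (hg : ∀ l ∈ lens, pvOkv k (g l))
    (hatt : (∃ l ∈ lens, g l = some k) ∨ b = some k) :
    lens.foldl (fun b l => pvUpdateBest b (g l)) b = some k := by
  induction lens generalizing b with
  | nil =>
    rcases hatt with ⟨l, hl, _⟩ | hb'
    · exact absurd hl (List.not_mem_nil)
    · simpa [hb']
  | cons l rest ih =>
    rw [List.foldl_cons]
    rcases hatt with ⟨l', hl', hgl'⟩ | hbk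
    · by_cases hl : g l = some k
      · rw [hl, pvUpdateBest_attained hb]
        exact ih (some k) (Or.inr (Or.inl rfl)) (fun x hx => hg x (List.mem_cons_of_mem l hx))
          (Or.inr rfl)
      · have hl'' : l' ∈ rest := by
          rcases List.mem_cons.mp hl' with h | h
          · exact absurd (h ▸ hgl') hl
          · exact h
        exact ih _ (pvUpdateBest_okv hb (hg l (List.mem_cons_self)))
          (fun x hx => hg x (List.mem_cons_of_mem l hx)) (Or.inl ⟨l', hl'', hgl'⟩)
    · subst hbk
      rw [pvUpdateBest_keep (hg l (List.mem_cons_self))]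
      exact ih (some k) (Or.inr (Or.inl rfl)) (fun x hx => hg x (List.mem_cons_of_mem l hx))
        (Or.inr rfl)

theorem pvFold_none (g : Int → Option Int) (lens : List Int) (b : Option Int)
    (hg : ∀ l ∈ lens, g l = none) :
    lens.foldl (fun b l => pvUpdateBest b (g l)) b = b := by
  induction lens generalizing b with
  | nil => rfl
  | cons l rest ih =>
    rw [List.foldl_cons, hg l (List.mem_cons_self), ]
    exact ih _ (fun x hx => hg x (List.mem_cons_of_mem l hx))

-- the key of the l-th query is the length-l prefix of last (on the list side)
theorem pvSliceKey (last : String) (l : Int) (hl : 0 ≤ l) :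
    (PySem.Str.slice last none (some l)).toList = last.toList.take l.toNat := by
  rw [PySem.Str.toList_slice, PySem.Chars.slice_eq_listSlice, PySem.List.slice_to _ hl]

-- CORE: the prefix-dictionary minimum IS A's first startswith match
theorem pvCore (last : String) (ps : List String) (k : Int) :
    (PySem.List.pyRange 0 (PySem.Str.len last + 1) 1).foldl
        (fun b l => pvUpdateBest b (pvFirstIdx (PySem.Str.slice last none (some l)) ps k)) none
      = Option.map (fun i : Nat => k + (i : Int)) (pvFindIdxA last ps 0) := by
  induction ps generalizing k with
  | nil =>
    rw [pvFold_none _ _ _ (fun l _ => by simp [pvFirstIdx])]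
    simp [pvFindIdxA]
  | cons p rest ih =>
    by_cases h : PySem.Str.startswith last p = true
    · -- p is a prefix of last: the dict minimum is attained at length = len(p), value k
      rw [pvFindIdxA, if_pos h]
      have hpre : p.toList <+: last.toList := by
        rw [PySem.Str.startswith_eq] at h
        exact (PySem.Chars.startswith_iff _ _).mp h
      have hlen : p.toList.length ≤ last.toList.length := hpre.length_le
      have hokv : ∀ l ∈ PySem.List.pyRange 0 (PySem.Str.len last + 1) 1,
          pvOkv k (pvFirstIdx (PySem.Str.slice last none (some l)) (p :: rest) k) := by
        intro l _
        cases hg : pvFirstIdx (PySem.Str.slice last none (some l)) (p :: rest) k with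
        | none => exact Or.inl rfl
        | some v =>
          have := pvFirstIdx_ge _ _ _ _ hg
          rcases eq_or_lt_of_le this with he | hlt
          · subst he
            exact Or.inr (Or.inl rfl)
          · exact Or.inr (Or.inr ⟨v, rfl, hlt⟩)
      have hmem : (p.toList.length : Int) ∈ PySem.List.pyRange 0 (PySem.Str.len last + 1) 1 := by
        rw [PySem.List.mem_pyRange_one]
        rw [PySem.Str.len_eq]
        omega
      have hatt : pvFirstIdx (PySem.Str.slice last none (some (p.toList.length : Int)))
          (p :: rest) k = some k := by
        have hkey : PySem.Str.slice last none (some (p.toList.length : Int)) = p := by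
          apply String.toList_inj.mp
          rw [pvSliceKey _ _ (by positivity)]
          simp only [Int.toNat_natCast]
          exact (List.prefix_iff_eq_take.mp hpre).symm
        rw [hkey, pvFirstIdx, if_pos rfl]
      rw [pvFold_attain _ _ _ (Or.inl rfl) hokv (Or.inl ⟨_, hmem, hatt⟩)]
      simp
    · -- p is not a prefix of last: no query key can equal p, so the head is skipped everywhere
      have hnp : ∀ l ∈ PySem.List.pyRange 0 (PySem.Str.len last + 1) 1,
          PySem.Str.slice last none (some l) ≠ p := by
        intro l hlmem hkey
        apply h
        rw [PySem.Str.startswith_eq]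
        apply (PySem.Chars.startswith_iff _ _).mpr
        have hl0 : 0 ≤ l := (PySem.List.mem_pyRange_one.mp hlmem).1
        rw [← hkey, pvSliceKey _ _ hl0]
        exact List.take_prefix _ _
      have hcong := PySem.List.foldl_congr_mem
        (PySem.List.pyRange 0 (PySem.Str.len last + 1) 1)
        (fun b l => pvUpdateBest b (pvFirstIdx (PySem.Str.slice last none (some l)) (p :: rest) k))
        (fun b l => pvUpdateBest b (pvFirstIdx (PySem.Str.slice last none (some l)) rest (k + 1)))
        none
        (fun acc l hl => by
          show pvUpdateBest acc (pvFirstIdx (PySem.Str.slice last none (some l)) (p :: rest) k)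
              = pvUpdateBest acc (pvFirstIdx (PySem.Str.slice last none (some l)) rest (k + 1))
          rw [pvFirstIdx_cons, if_neg (fun he => hnp l hl he.symm)])
      rw [hcong, ih (k + 1), pvFindIdxA, if_neg h, pvFindIdxA_shift last rest 1]
      cases pvFindIdxA last rest 0 with
      | none => rfl
      | some v => simp only [Option.map_some, Option.some.injEq]; push_cast; omega

-- A's scan, when it finds an index, finds one inside the list
theorem pvFindIdxA_lt (last : String) (ps : List String) (k i : Nat)
    (h : pvFindIdxA last ps k = some i) : i < k + ps.length := by
  induction ps generalizing k with
  | nil => simp [pvFindIdxA] at h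
  | cons p rest ih =>
    rw [pvFindIdxA] at h
    split at h
    · injection h with h
      simp only [List.length_cons]
      omega
    · have := ih (k + 1) h
      simp only [List.length_cons]
      omega

-- ===== VERDICT (by name: the statement is the Claim_ definition above) =====
theorem get_next_step_prefix_spec : Claim_equal_get_next_step_prefix := by
  intro ps cs _ _
  unfold Spec_get_next_step_prefix get_next_step_prefix get_next_step_prefix_alt
  by_cases h : cs.isEmpty
  · simp [h]
  · simp only [h, Bool.false_eq_true, if_false]
    have hpos : ∀ c : String,
        ((PySem.List.enumerate ps 0).foldl
            (fun d pr => if d.contains pr.2 then d else d.insert pr.2 pr.1)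
            (PySem.Dict.empty : PySem.Dict String Int)).get? c = pvFirstIdx c ps 0 := by
      intro c
      rw [pvBuildPos_get, PySem.Dict.get?_empty, Option.none_or]
    simp only [hpos]
    rw [pvCore (cs.getLastD "") ps 0]
    cases hf : pvFindIdxA (cs.getLastD "") ps 0 with
    | none => rfl
    | some i =>
      have hlt : i < ps.length := by have := pvFindIdxA_lt _ _ _ _ hf; omega
      simp only [Option.map_some, zero_add]
      have hcond : ((i : Int) + 1 < (ps.length : Int)) ↔ (i < ps.length - 1) := by omega
      by_cases hc : i < ps.length - 1
      · rw [if_pos (hcond.mpr hc), if_pos hc]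
        have hx : Int.ofNat (i + 1) = (i : Int) + 1 := by simp
        rw [hx]
      · rw [if_neg (fun hx => hc (hcond.mp hx)), if_neg hc]
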